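-- pv_equiv track=rewrite | github.com/Sunandadadi/game-development | haunted_puzzle_part2.py | cell_distribution
-- ===== SOURCE A (Python) =====
-- def cell_distribution(puzzle: list) -> dict:
--     a = {}
--     for i in puzzle:
--         for j in i:
--             if not a.get(j):
--                 a[j] = 1
--             else:
--                 a[j] += 1
--     return a
-- ===== SOURCE B (Python) =====
-- def cell_distribution(puzzle: list) -> dict:
--     flat = [j for i in puzzle for j in i]
--     return {x: flat.count(x) for x in dict.fromkeys(flat)}
-- ===== Notes on version B (the rewrite author's own statement) =====
-- stated objective: simpler
-- what changed: Replaces the single accumulating dict pass with flatten + ordered dedup of the distinct elements, computing each count by a fresh flat.count scan.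
import Mathlib
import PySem

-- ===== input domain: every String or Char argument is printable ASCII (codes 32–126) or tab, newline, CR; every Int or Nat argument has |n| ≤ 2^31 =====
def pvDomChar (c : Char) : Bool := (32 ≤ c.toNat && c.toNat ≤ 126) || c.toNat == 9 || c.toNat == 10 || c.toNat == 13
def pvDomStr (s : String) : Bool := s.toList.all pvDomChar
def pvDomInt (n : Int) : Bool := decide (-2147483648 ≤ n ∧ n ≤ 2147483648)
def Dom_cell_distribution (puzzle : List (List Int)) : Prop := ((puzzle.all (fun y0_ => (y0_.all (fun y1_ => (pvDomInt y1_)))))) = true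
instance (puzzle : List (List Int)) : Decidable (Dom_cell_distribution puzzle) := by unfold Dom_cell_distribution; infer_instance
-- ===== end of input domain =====

-- B replaces A's single accumulating dict pass by flatten + ordered dedup + a per-element count scan (simpler; not faster).

-- ===== PORT A =====
-- the body of A's inner loop: 'if not a.get(j): a[j] = 1 else: a[j] += 1'
def cellStep (a : PySem.Dict Int Int) (j : Int) : PySem.Dict Int Int :=
  if ((a.get? j).getD 0) == 0 then a.insert j 1 else a.insert j (a.getD j 0 + 1)

def cell_distribution (puzzle : List (List Int)) : List (Int × Int) :=
  (puzzle.foldl (fun a i => i.foldl cellStep a) PySem.Dict.empty).items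

-- ===== PORT B =====
def cell_distribution_alt (puzzle : List (List Int)) : List (Int × Int) :=
  let flat := puzzle.foldl (fun acc i => acc ++ i) []
  (PySem.List.dedup flat).map (fun x => (x, (flat.count x : Int)))

-- ===== PRECONDITION & SPEC =====
def Spec_cell_distribution (puzzle : List (List Int)) (out : List (Int × Int)) : Prop := out = cell_distribution_alt puzzle
instance (puzzle : List (List Int)) (out : List (Int × Int)) : Decidable (Spec_cell_distribution puzzle out) := by unfold Spec_cell_distribution; infer_instance

-- ===== CLAIM (what is proved, stated in full; the proofs are below) =====
def Claim_equal_cell_distribution : Prop := ∀ (puzzle : List (List Int)), Dom_cell_distribution puzzle → Spec_cell_distribution puzzle (cell_distribution puzzle)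

-- ===== LEMMAS AND PROOFS =====

-- A's per-element update is the unconditional counter update: when the test fires the stored count is 0.
theorem cell_step_eq (a : PySem.Dict Int Int) (j : Int) :
    cellStep a j = a.insert j (a.getD j 0 + 1) := by
  unfold cellStep
  split_ifs with h
  · have h0 : a.getD j 0 = 0 := by
      simpa [PySem.Dict.getD] using of_decide_eq_true h
    rw [h0]; norm_num
  · rfl

-- ===== VERDICT (by name: the statement is the Claim_ definition above) =====
theorem cell_distribution_spec : Claim_equal_cell_distribution := by
  intro puzzle _
  unfold Spec_cell_distribution cell_distribution cell_distribution_alt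
  rw [PySem.List.foldl_append_eq_flatten]
  simp only [List.nil_append]
  have hA : puzzle.foldl (fun a i => i.foldl cellStep a) PySem.Dict.empty
      = puzzle.flatten.foldl (fun a j => a.insert j (a.getD j 0 + 1)) PySem.Dict.empty := by
    rw [List.foldl_flatten]
    apply PySem.List.foldl_congr_mem
    intro acc i _
    apply PySem.List.foldl_congr_mem
    intro a j _
    exact cell_step_eq a j
  rw [hA, PySem.Dict.foldl_insert_getD_add_one_eq_counter, PySem.Dict.items_counter,
    PySem.List.dedup_eq_ofList]
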